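-- pv_equiv track=rewrite | github.com/GunvantGMC/Competitive-Programing | PassTheBaton.py | repeatRev
-- ===== SOURCE A (Python) =====
-- def repeatRev(l, n):
--     tArr = []
--     for i in range(0, len(l)):
--         if(i % 2 == 1):
--             tArr += (l[::-1])
--         else:
--             tArr += (l[0:n])
--     return tArr
-- ===== SOURCE B (Python) =====
-- def repeatRev(l, n):
--     pre = l[0:n]
--     rev = l[::-1]
--     out = (pre + rev) * (len(l) // 2)
--     if len(l) % 2:
--         out = out + pre
--     return out
-- ===== Notes on version B (the rewrite author's own statement) =====
-- stated objective: simpler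
-- what changed: Replaces the per-index loop with an i%2 branch by building the fixed alternating block (pre+rev) once and repeating it len(l)//2 times via list multiplication, appending one extra pre for odd length.
import Mathlib
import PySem

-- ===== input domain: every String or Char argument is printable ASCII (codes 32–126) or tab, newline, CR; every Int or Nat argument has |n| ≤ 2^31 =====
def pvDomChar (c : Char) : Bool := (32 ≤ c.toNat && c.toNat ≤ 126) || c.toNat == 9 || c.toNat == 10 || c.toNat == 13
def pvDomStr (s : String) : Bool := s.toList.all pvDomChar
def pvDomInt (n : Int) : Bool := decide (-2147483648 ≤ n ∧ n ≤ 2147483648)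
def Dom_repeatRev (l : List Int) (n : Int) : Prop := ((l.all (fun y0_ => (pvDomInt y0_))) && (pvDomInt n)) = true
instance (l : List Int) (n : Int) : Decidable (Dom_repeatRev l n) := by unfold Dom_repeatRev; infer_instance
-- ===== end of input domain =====

-- B builds the alternating output as the block (l[0:n] ++ reverse l) repeated len//2 times
-- plus one extra prefix for odd length, instead of A's per-index loop with an i % 2 branch.


-- ===== PORT A =====
def repeatRev (l : List Int) (n : Int) : List Int :=
  (PySem.List.pyRange 0 (l.length : Int) 1).foldl (fun tArr i =>
    if i % 2 == 1 then tArr ++ ((PySem.List.slice? l none none (-1)).getD [])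
    else tArr ++ PySem.List.slice l (some 0) (some n)) []

-- ===== PORT B =====
def repeatRev_alt (l : List Int) (n : Int) : List Int :=
  let pre := PySem.List.slice l (some 0) (some n)
  let rev := (PySem.List.slice? l none none (-1)).getD []
  let out := (List.replicate (l.length / 2) (pre ++ rev)).flatten
  if l.length % 2 == 1 then out ++ pre else out

-- ===== PRECONDITION & SPEC =====
def Spec_repeatRev (l : List Int) (n : Int) (out : List Int) : Prop := out = repeatRev_alt l n
instance (l : List Int) (n : Int) (out : List Int) : Decidable (Spec_repeatRev l n out) := by unfold Spec_repeatRev; infer_instance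

-- ===== CLAIM (what is proved, stated in full; the proofs are below) =====
def Claim_equal_repeatRev : Prop := ∀ (l : List Int) (n : Int), Dom_repeatRev l n → Spec_repeatRev l n (repeatRev l n)

-- ===== LEMMAS AND PROOFS =====

-- A's loop over range(0, k) produces the alternating blocks in closed form.
theorem repeatRev_loop_closed (pre rev : List Int) (k : ℕ) :
    (PySem.List.pyRange 0 (k : Int) 1).foldl (fun tArr i =>
      if i % 2 == 1 then tArr ++ rev else tArr ++ pre) []
    = (List.replicate (k / 2) (pre ++ rev)).flatten ++
        (if k % 2 == 1 then pre else []) := by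
  induction k with
  | zero => simp [PySem.List.pyRange_zero_nat]
  | succ m ih =>
      have h : ((m : Int) + 1) = ((m + 1 : ℕ) : Int) := by push_cast; ring
      rw [show ((m + 1 : ℕ) : Int) = (m : Int) + 1 by push_cast; ring,
          PySem.List.pyRange_one_succ_right (by positivity),
          List.foldl_append, ih]
      rcases Nat.even_or_odd m with he | ho
      · obtain ⟨t, ht⟩ := he
        have hm2 : m % 2 = 0 := by omega
        have hmod : (m : Int) % 2 == 1 ↔ False := by
          simp; omega
        simp only [List.foldl_cons, List.foldl_nil]
        have : ¬ ((m : Int) % 2 == 1) = true := by simp; omega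
        rw [if_neg this]
        have h1 : (m + 1) % 2 = 1 := by omega
        have h2 : (m + 1) / 2 = m / 2 := by omega
        simp [hm2, h1, h2]
      · obtain ⟨t, ht⟩ := ho
        have hm2 : m % 2 = 1 := by omega
        simp only [List.foldl_cons, List.foldl_nil]
        have : ((m : Int) % 2 == 1) = true := by simp; omega
        rw [if_pos this]
        have h1 : (m + 1) % 2 = 0 := by omega
        have h2 : (m + 1) / 2 = m / 2 + 1 := by omega
        simp [hm2, h1, h2, List.replicate_succ']

-- ===== VERDICT (by name: the statement is the Claim_ definition above) =====
theorem repeatRev_spec : Claim_equal_repeatRev := by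
  intro l n _
  unfold Spec_repeatRev repeatRev repeatRev_alt
  rw [repeatRev_loop_closed (PySem.List.slice l (some 0) (some n))
      ((PySem.List.slice? l none none (-1)).getD []) l.length]
  split <;> simp
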